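-- pv_equiv track=rewrite | github.com/leideng/CANN-8.1.RC1 | Ascend/ascend-toolkit/8.1.RC1/opp/built-in/op_impl/ai_core/tbe/impl/dynamic/avg_pool3d_grad.py | _transform_shape_with_format
-- ===== SOURCE A (Python) =====
-- _ORI_SHAPE_DIM_SIZE = 5
--
-- def _transform_shape_with_format(src_format, to_format, ori_shape):
--     # need not to transform
--     if src_format == to_format:
--         return list(ori_shape)
--     res_shape = [1 for _ in range(_ORI_SHAPE_DIM_SIZE)]
--     for i in range(_ORI_SHAPE_DIM_SIZE):
--         for j in range(_ORI_SHAPE_DIM_SIZE):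
--             if to_format[i] == src_format[j]:
--                 res_shape[i] = ori_shape[j]
--                 break
--     return res_shape
-- ===== SOURCE B (Python) =====
-- _ORI_SHAPE_DIM_SIZE = 5
--
-- def _transform_shape_with_format(src_format, to_format, ori_shape):
--     # need not to transform
--     if src_format == to_format:
--         return list(ori_shape)
--     # scatter: walk the source format back to front and write each dim into every
--     # matching target slot; overwriting makes the smallest source index win,
--     # which is exactly the first-match/`break` rule of the gather formulation.
--     res_shape = [1 for _ in range(_ORI_SHAPE_DIM_SIZE)]
--     for j in range(_ORI_SHAPE_DIM_SIZE - 1, -1, -1):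
--         c = src_format[j]
--         v = ori_shape[j]
--         for i in range(_ORI_SHAPE_DIM_SIZE):
--             if to_format[i] == c:
--                 res_shape[i] = v
--     return res_shape
-- ===== Notes on version B (the rewrite author's own statement) =====
-- stated objective: alternative
-- what changed: Inverts the data flow: instead of gathering (for each target slot, linearly search the source with break), B scatters: it walks the source format back to front and writes each dimension into every matching target slot, last-write-wins overwriting reproducing the first-match rule.
-- outside the precondition, e.g. on _transform_shape_with_format('ABCDE', 'ABCFG', [2, 3, 4]): A returns [2, 3, 4, 1, 1], B raises IndexError; on _transform_shape_with_format('AB', 'ABABA', [7, 8]): A returns [7, 8, 7, 8, 7], B raises IndexError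
import Mathlib
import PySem

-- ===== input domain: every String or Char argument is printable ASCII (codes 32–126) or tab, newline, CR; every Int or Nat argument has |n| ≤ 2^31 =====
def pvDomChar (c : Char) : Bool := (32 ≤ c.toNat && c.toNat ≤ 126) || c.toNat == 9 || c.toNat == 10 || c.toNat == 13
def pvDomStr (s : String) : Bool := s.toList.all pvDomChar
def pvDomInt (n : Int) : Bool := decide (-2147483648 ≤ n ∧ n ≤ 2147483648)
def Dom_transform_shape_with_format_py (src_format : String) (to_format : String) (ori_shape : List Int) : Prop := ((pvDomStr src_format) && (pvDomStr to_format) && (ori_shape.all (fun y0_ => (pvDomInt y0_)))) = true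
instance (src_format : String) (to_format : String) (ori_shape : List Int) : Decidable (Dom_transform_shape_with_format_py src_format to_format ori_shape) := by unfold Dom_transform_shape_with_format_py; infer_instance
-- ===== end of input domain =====

-- B inverts the data flow: instead of A's gather (per target slot, linear search of the source
-- with break), it scatters the source dims back-to-front into matching target slots,
-- last-write-wins overwriting giving the first-match rule; objective: alternative.

-- ===== PORT A =====
-- inner `for j in range(5): if to_format[i] == src_format[j]: res_shape[i] = ori_shape[j]; break`
-- (pyGet? = none is Python's IndexError, excluded by Pre_; the `.getD 1` default there is dead inside Pre_)
def pvInnerA (toL srcL : List Char) (ori : List Int) (res : List Int) (i : Int) : List Int → List Int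
  | [] => res
  | j :: js =>
    if PySem.List.pyGet? toL i = PySem.List.pyGet? srcL j then
      res.set i.toNat ((PySem.List.pyGet? ori j).getD 1)
    else pvInnerA toL srcL ori res i js

def transform_shape_with_format_py (src_format : String) (to_format : String) (ori_shape : List Int) : List Int :=
  if src_format == to_format then ori_shape
  else
    (PySem.List.pyRange 0 5 1).foldl
      (fun res i => pvInnerA to_format.toList src_format.toList ori_shape res i (PySem.List.pyRange 0 5 1))
      (List.replicate 5 1)

-- ===== PORT B =====
-- inner `for i in range(5): if to_format[i] == c: res_shape[i] = v` (no break)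
def pvPassB (toL : List Char) (c : Char) (v : Int) (res : List Int) : List Int :=
  (PySem.List.pyRange 0 5 1).foldl
    (fun r i =>
      match PySem.List.pyGet? toL i with
      | some ch => if ch = c then r.set i.toNat v else r
      | none => r)
    res

-- outer `for j in range(4, -1, -1): c = src_format[j]; v = ori_shape[j]; <inner pass>`
-- (the `_ , _ => res` branch is Python's IndexError on short inputs, excluded by Pre_)
def transform_shape_with_format_py_alt (src_format : String) (to_format : String) (ori_shape : List Int) : List Int :=
  if src_format == to_format then ori_shape
  else
    (PySem.List.pyRange 4 (-1) (-1)).foldl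
      (fun res j =>
        match PySem.List.pyGet? src_format.toList j, PySem.List.pyGet? ori_shape j with
        | some c, some v => pvPassB to_format.toList c v res
        | _, _ => res)
      (List.replicate 5 1)

-- ===== PRECONDITION & SPEC =====
-- Pre_ excludes inputs where the formats differ and some argument is shorter than 5: there both
-- programs index past the end of a sequence (A occasionally still returns when every inner scan
-- breaks early, but B's eager src_format[j]/ori_shape[j] reads raise IndexError on those inputs).
def Pre_transform_shape_with_format_py (src_format : String) (to_format : String) (ori_shape : List Int) : Prop :=
  src_format = to_format ∨ (5 ≤ src_format.toList.length ∧ 5 ≤ to_format.toList.length ∧ 5 ≤ ori_shape.length)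
instance (src_format : String) (to_format : String) (ori_shape : List Int) : Decidable (Pre_transform_shape_with_format_py src_format to_format ori_shape) := by unfold Pre_transform_shape_with_format_py; infer_instance

def pvWitness_transform_shape_with_format_py : String × String × List Int := ("NCDHW", "NDHWC", [6, 3, 4, 5, 2])

def Spec_transform_shape_with_format_py (src_format : String) (to_format : String) (ori_shape : List Int) (out : List Int) : Prop := out = transform_shape_with_format_py_alt src_format to_format ori_shape
instance (src_format : String) (to_format : String) (ori_shape : List Int) (out : List Int) : Decidable (Spec_transform_shape_with_format_py src_format to_format ori_shape out) := by unfold Spec_transform_shape_with_format_py; infer_instance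

-- ===== CLAIM (what is proved, stated in full; the proofs are below) =====
def Claim_equal_transform_shape_with_format_py : Prop := ∀ (src_format : String) (to_format : String) (ori_shape : List Int), Dom_transform_shape_with_format_py src_format to_format ori_shape → Pre_transform_shape_with_format_py src_format to_format ori_shape → Spec_transform_shape_with_format_py src_format to_format ori_shape (transform_shape_with_format_py src_format to_format ori_shape)

-- ===== LEMMAS AND PROOFS =====

-- the common value both programs compute at one output position: first-wins match of c among s0..s4
def pvG (s0 s1 s2 s3 s4 : Char) (o0 o1 o2 o3 o4 : Int) (c : Char) : Int :=
  if c = s0 then o0 else if c = s1 then o1 else if c = s2 then o2 else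
  if c = s3 then o3 else if c = s4 then o4 else 1

theorem pv_five {α : Type} (l : List α) (h : 5 ≤ l.length) :
    ∃ a b c d e r, l = a :: b :: c :: d :: e :: r := by
  rcases l with _ | ⟨a, _ | ⟨b, _ | ⟨c, _ | ⟨d, _ | ⟨e, r⟩⟩⟩⟩⟩ <;> simp at h
  exact ⟨a, b, c, d, e, r, rfl⟩

theorem pv_get_0 {α : Type} (a0 a1 a2 a3 a4 : α) (r : List α) :
    PySem.List.pyGet? (a0 :: a1 :: a2 :: a3 :: a4 :: r) (0 : Int) = some a0 := by
  rw [show (0 : Int) = ((0 : Nat) : Int) from rfl, PySem.List.pyGet?_natCast]; simp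
theorem pv_get_1 {α : Type} (a0 a1 a2 a3 a4 : α) (r : List α) :
    PySem.List.pyGet? (a0 :: a1 :: a2 :: a3 :: a4 :: r) (1 : Int) = some a1 := by
  rw [show (1 : Int) = ((1 : Nat) : Int) from rfl, PySem.List.pyGet?_natCast]; simp
theorem pv_get_2 {α : Type} (a0 a1 a2 a3 a4 : α) (r : List α) :
    PySem.List.pyGet? (a0 :: a1 :: a2 :: a3 :: a4 :: r) (2 : Int) = some a2 := by
  rw [show (2 : Int) = ((2 : Nat) : Int) from rfl, PySem.List.pyGet?_natCast]; simp
theorem pv_get_3 {α : Type} (a0 a1 a2 a3 a4 : α) (r : List α) :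
    PySem.List.pyGet? (a0 :: a1 :: a2 :: a3 :: a4 :: r) (3 : Int) = some a3 := by
  rw [show (3 : Int) = ((3 : Nat) : Int) from rfl, PySem.List.pyGet?_natCast]; simp
theorem pv_get_4 {α : Type} (a0 a1 a2 a3 a4 : α) (r : List α) :
    PySem.List.pyGet? (a0 :: a1 :: a2 :: a3 :: a4 :: r) (4 : Int) = some a4 := by
  rw [show (4 : Int) = ((4 : Nat) : Int) from rfl, PySem.List.pyGet?_natCast]; simp

-- one inner pass of B on a concrete 5-element result: pointwise conditional overwrite
theorem pv_passB_concrete (t0 t1 t2 t3 t4 : Char) (tr : List Char) (c : Char) (v : Int)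
    (r0 r1 r2 r3 r4 : Int) :
    pvPassB (t0 :: t1 :: t2 :: t3 :: t4 :: tr) c v [r0, r1, r2, r3, r4]
      = [if t0 = c then v else r0, if t1 = c then v else r1, if t2 = c then v else r2,
         if t3 = c then v else r3, if t4 = c then v else r4] := by
  have hrange : PySem.List.pyRange 0 5 1 = [0, 1, 2, 3, 4] := rfl
  simp only [pvPassB, hrange, List.foldl, pv_get_0, pv_get_1, pv_get_2, pv_get_3, pv_get_4]
  split_ifs <;> simp_all [List.set]

-- B's whole fold computes the first-wins chain pvG at every position
theorem pv_B_concrete (s0 s1 s2 s3 s4 : Char) (sr : List Char)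
    (t0 t1 t2 t3 t4 : Char) (tr : List Char) (o0 o1 o2 o3 o4 : Int) (orr : List Int) :
    (PySem.List.pyRange 4 (-1) (-1)).foldl
      (fun res j =>
        match PySem.List.pyGet? (s0 :: s1 :: s2 :: s3 :: s4 :: sr) j,
              PySem.List.pyGet? (o0 :: o1 :: o2 :: o3 :: o4 :: orr) j with
        | some c, some v => pvPassB (t0 :: t1 :: t2 :: t3 :: t4 :: tr) c v res
        | _, _ => res)
      (List.replicate 5 1)
      = [pvG s0 s1 s2 s3 s4 o0 o1 o2 o3 o4 t0, pvG s0 s1 s2 s3 s4 o0 o1 o2 o3 o4 t1,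
         pvG s0 s1 s2 s3 s4 o0 o1 o2 o3 o4 t2, pvG s0 s1 s2 s3 s4 o0 o1 o2 o3 o4 t3,
         pvG s0 s1 s2 s3 s4 o0 o1 o2 o3 o4 t4] := by
  have hrange : PySem.List.pyRange 4 (-1) (-1) = [4, 3, 2, 1, 0] := rfl
  have hrep : (List.replicate 5 (1 : Int)) = [1, 1, 1, 1, 1] := rfl
  simp only [hrange, hrep, List.foldl, pv_get_0, pv_get_1, pv_get_2, pv_get_3, pv_get_4,
    pv_passB_concrete, pvG]

-- one row of A: the inner scan over j = 0..4 with break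
theorem pv_rowA (s0 s1 s2 s3 s4 t : Char) (sr toL : List Char) (o0 o1 o2 o3 o4 : Int)
    (orr : List Int) (res : List Int) (i : Int) (ht : PySem.List.pyGet? toL i = some t) :
    pvInnerA toL (s0 :: s1 :: s2 :: s3 :: s4 :: sr) (o0 :: o1 :: o2 :: o3 :: o4 :: orr) res i
        [0, 1, 2, 3, 4]
      = if t = s0 ∨ t = s1 ∨ t = s2 ∨ t = s3 ∨ t = s4 then
          res.set i.toNat (pvG s0 s1 s2 s3 s4 o0 o1 o2 o3 o4 t)
        else res := by
  simp only [pvInnerA, ht, pv_get_0, pv_get_1, pv_get_2, pv_get_3, pv_get_4, Option.some.injEq,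
    Option.getD_some, pvG]
  split_ifs <;> simp_all

-- ===== VERDICT (by name: the statement is the Claim_ definition above) =====
theorem transform_shape_with_format_py_spec : Claim_equal_transform_shape_with_format_py := by
  intro s t o _ hpre
  unfold Spec_transform_shape_with_format_py
  by_cases he : s = t
  · simp [transform_shape_with_format_py, transform_shape_with_format_py_alt, he]
  · have heb : (s == t) = false := by simp [he]
    rcases hpre with h | ⟨hs, ht, ho⟩
    · exact absurd h he
    obtain ⟨s0, s1, s2, s3, s4, sr, hseq⟩ := pv_five s.toList hs
    obtain ⟨t0, t1, t2, t3, t4, tr, hteq⟩ := pv_five t.toList ht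
    obtain ⟨o0, o1, o2, o3, o4, orr, hoeq⟩ := pv_five o ho
    have hrange : PySem.List.pyRange 0 5 1 = [0, 1, 2, 3, 4] := rfl
    rw [transform_shape_with_format_py, transform_shape_with_format_py_alt, heb]
    simp only [Bool.false_eq_true, if_false, hrange, hseq, hteq, hoeq, List.foldl,
      pv_B_concrete,
      pv_rowA s0 s1 s2 s3 s4 t0 sr _ o0 o1 o2 o3 o4 orr _ 0 (pv_get_0 t0 t1 t2 t3 t4 tr),
      pv_rowA s0 s1 s2 s3 s4 t1 sr _ o0 o1 o2 o3 o4 orr _ 1 (pv_get_1 t0 t1 t2 t3 t4 tr),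
      pv_rowA s0 s1 s2 s3 s4 t2 sr _ o0 o1 o2 o3 o4 orr _ 2 (pv_get_2 t0 t1 t2 t3 t4 tr),
      pv_rowA s0 s1 s2 s3 s4 t3 sr _ o0 o1 o2 o3 o4 orr _ 3 (pv_get_3 t0 t1 t2 t3 t4 tr),
      pv_rowA s0 s1 s2 s3 s4 t4 sr _ o0 o1 o2 o3 o4 orr _ 4 (pv_get_4 t0 t1 t2 t3 t4 tr)]
    by_cases m0 : t0 = s0 ∨ t0 = s1 ∨ t0 = s2 ∨ t0 = s3 ∨ t0 = s4 <;>
      by_cases m1 : t1 = s0 ∨ t1 = s1 ∨ t1 = s2 ∨ t1 = s3 ∨ t1 = s4 <;>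
      by_cases m2 : t2 = s0 ∨ t2 = s1 ∨ t2 = s2 ∨ t2 = s3 ∨ t2 = s4 <;>
      by_cases m3 : t3 = s0 ∨ t3 = s1 ∨ t3 = s2 ∨ t3 = s3 ∨ t3 = s4 <;>
      by_cases m4 : t4 = s0 ∨ t4 = s1 ∨ t4 = s2 ∨ t4 = s3 ∨ t4 = s4 <;>
      simp_all [List.set, pvG, List.replicate]
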